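-- pv_equiv track=rewrite | github.com/marianelamedina/SeqDT-TimeSeries | gap_constraint.py | check_gap_constraint
-- ===== SOURCE A (Python) =====
-- def check_gap_constraint(sequence: list, feature: list, g: int = 1) -> tuple:
--     """
--     Checks whether a feature is present in a sequence while respecting the gap constraint
--     (maximum allowed gap between consecutive elements of the feature).
--     g = 1 means contiguous elements (substring),
--     g = 0 means no gap constraint (standard subsequence).
--
--     The function returns the earliest end match position (the position of the last element
--     of the first valid match encountered, if multiple matches exist).
--
--
--     Input:
--         - sequence: list
--         - feature: list
--         - g: int
--
--     Output:
--         Tuple of: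
--             - match: bool (True if the feature is found, False otherwise)
--             - last_match_pos: int (position of the last element of the feature in the sequence, None if no match)
--     """
--     if not feature:
--         return True, -1
--
--     feature_index = 0
--     last_match_pos = -1
--
--     for seq_index, symbol in enumerate(sequence):
--         if symbol == feature[feature_index]:
--             if last_match_pos != -1 and g != 0:
--                 distance = seq_index - last_match_pos
--                 if distance > g:
--                     return False, None  # Gap constraint not respected
--
--             last_match_pos = seq_index
--             feature_index += 1
--
--             # Found all the given features
--             if feature_index == len(feature):
--                 return True, last_match_pos
--
--     # Not found all the given features
--     return False, None
-- ===== SOURCE B (Python) =====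
-- def check_gap_constraint(sequence: list, feature: list, g: int = 1) -> tuple:
--     """Iterate over the feature, moving a search cursor through the sequence."""
--     if not feature:
--         return True, -1
--     n = len(sequence)
--     start = 0
--     last = -1
--     for sym in feature:
--         j = start
--         while j < n and sequence[j] != sym:
--             j += 1
--         if j == n:
--             return False, None
--         if last != -1 and g != 0 and j - last > g:
--             return False, None
--         last = j
--         start = j + 1
--     return True, last
-- ===== Notes on version B (the rewrite author's own statement) =====
-- stated objective: alternative
-- what changed: Inverted the loop nesting: A makes one pass over the sequence advancing a feature pointer, B loops over the feature elements and for each scans the sequence forward from a cursor for its first occurrence, checking the gap when found.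
import Mathlib
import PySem

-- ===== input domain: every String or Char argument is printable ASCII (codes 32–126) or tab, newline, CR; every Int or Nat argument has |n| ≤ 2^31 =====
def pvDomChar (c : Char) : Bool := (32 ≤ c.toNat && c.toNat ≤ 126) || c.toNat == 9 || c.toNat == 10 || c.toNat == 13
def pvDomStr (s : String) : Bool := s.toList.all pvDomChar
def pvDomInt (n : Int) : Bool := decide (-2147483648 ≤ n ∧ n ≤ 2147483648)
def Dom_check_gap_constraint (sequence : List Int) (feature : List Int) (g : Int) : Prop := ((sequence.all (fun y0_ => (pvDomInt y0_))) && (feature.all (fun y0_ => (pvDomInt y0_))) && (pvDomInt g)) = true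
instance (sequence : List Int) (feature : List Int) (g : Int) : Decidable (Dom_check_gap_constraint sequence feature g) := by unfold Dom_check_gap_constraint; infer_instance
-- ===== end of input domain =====

-- B inverts A's loop nesting (outer loop over the feature with a search cursor into the
-- sequence, instead of one pass over the sequence with a feature pointer); alternative, same cost.

-- ===== PORT A =====
-- A's for-loop over enumerate(sequence) with state (feature_index, last_match_pos).
-- feature_index is always < feature.length when feature[feature_index] is read (the loop
-- returns as soon as it reaches the length), so List.getD is exact here.
def aGo (feature : List Int) (g : Int) : List (Int × Int) → Nat → Int → Bool × Option Int
  | [], _, _ => (false, none)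
  | (i, s) :: rest, fi, last =>
    if s = feature.getD fi 0 then
      if last ≠ -1 ∧ g ≠ 0 ∧ i - last > g then (false, none)
      else
        if fi + 1 = feature.length then (true, some i)
        else aGo feature g rest (fi + 1) i
    else aGo feature g rest fi last

def check_gap_constraint (sequence : List Int) (feature : List Int) (g : Int) : Bool × Option Int :=
  if feature = [] then (true, some (-1))
  else aGo feature g (PySem.List.enumerate sequence 0) 0 (-1)

-- ===== PORT B =====
-- B's inner while-loop: scan the sequence suffix from absolute index j for sym.
def bScan (sym : Int) : List Int → Nat → Option Nat
  | [], _ => none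
  | x :: xs, j => if x = sym then some j else bScan sym xs (j + 1)

-- B's outer for-loop over the feature with state (start, last).
def bGo (sequence : List Int) (g : Int) : List Int → Nat → Int → Bool × Option Int
  | [], _, last => (true, some last)
  | sym :: fs, start, last =>
    match bScan sym (sequence.drop start) start with
    | none => (false, none)
    | some j =>
      if last ≠ -1 ∧ g ≠ 0 ∧ (j : Int) - last > g then (false, none)
      else bGo sequence g fs (j + 1) (j : Int)

def check_gap_constraint_alt (sequence : List Int) (feature : List Int) (g : Int) : Bool × Option Int :=
  if feature = [] then (true, some (-1))
  else bGo sequence g feature 0 (-1)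

-- ===== PRECONDITION & SPEC =====
def Spec_check_gap_constraint (sequence : List Int) (feature : List Int) (g : Int) (out : Bool × Option Int) : Prop := out = check_gap_constraint_alt sequence feature g
instance (sequence : List Int) (feature : List Int) (g : Int) (out : Bool × Option Int) : Decidable (Spec_check_gap_constraint sequence feature g out) := by unfold Spec_check_gap_constraint; infer_instance

-- ===== CLAIM (what is proved, stated in full; the proofs are below) =====
def Claim_equal_check_gap_constraint : Prop := ∀ (sequence : List Int) (feature : List Int) (g : Int), Dom_check_gap_constraint sequence feature g → Spec_check_gap_constraint sequence feature g (check_gap_constraint sequence feature g)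

-- ===== LEMMAS AND PROOFS =====

theorem key (seq feature : List Int) (g : Int) :
    ∀ (tail : List Int) (i fi : Nat) (last : Int) (f : Int) (fs : List Int),
      seq.drop i = tail → feature.drop fi = f :: fs →
      aGo feature g (PySem.List.enumerate tail (i : Int)) fi last = bGo seq g (f :: fs) i last := by
  intro tail
  induction tail with
  | nil =>
    intro i fi last f fs hdrop hfeat
    simp [PySem.List.enumerate_nil, aGo, bGo, hdrop, bScan]
  | cons x rest ih =>
    intro i fi last f fs hdrop hfeat
    have hgetD : feature.getD fi 0 = f := by
      have : feature[fi]? = some f := by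
        have h0 : (feature.drop fi)[0]? = some f := by simp [hfeat]
        simpa using h0
      simp [List.getD_eq_getElem?_getD, this]
    have hdrop' : seq.drop (i + 1) = rest := by
      rw [← List.tail_drop, hdrop]; rfl
    rw [PySem.List.enumerate_cons]
    by_cases hx : x = f
    · -- match at index i: both sides find i
      subst hx
      have hscan : bScan x (seq.drop i) i = some i := by
        rw [hdrop]; simp [bScan]
      simp only [aGo, bGo, hgetD, if_true, hscan]
      by_cases hgap : last ≠ -1 ∧ g ≠ 0 ∧ (i : Int) - last > g
      · rw [if_pos hgap, if_pos hgap]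
      · rw [if_neg hgap, if_neg hgap]
        have hlen : fi < feature.length := by
          by_contra h
          simp [List.drop_eq_nil_of_le (Nat.le_of_not_lt h)] at hfeat
        have hlendrop : feature.length - fi = fs.length + 1 := by
          have := congrArg List.length hfeat
          simpa [List.length_drop] using this
        cases fs with
        | nil =>
          have hdone : fi + 1 = feature.length := by simp at hlendrop; omega
          rw [if_pos hdone]
          simp [bGo]
        | cons f' fs' =>
          have hnot : ¬ (fi + 1 = feature.length) := by
            simp at hlendrop; omega
          have hfeat' : feature.drop (fi + 1) = f' :: fs' := by
            rw [← List.tail_drop, hfeat]; rfl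
          rw [if_neg hnot]
          have := ih (i + 1) (fi + 1) (i : Int) f' fs' hdrop' hfeat'
          rw [show ((i : Int) + 1) = ((i + 1 : Nat) : Int) by push_cast; ring]
          exact this
    · -- no match at i: A skips; B's scan steps to i+1
      have hscan : bScan f (seq.drop i) i = bScan f (seq.drop (i + 1)) (i + 1) := by
        rw [hdrop, hdrop']; simp [bScan, hx]
      have hne : ¬ (x = feature.getD fi 0) := by rw [hgetD]; exact hx
      have := ih (i + 1) fi last f fs hdrop' hfeat
      simp only [aGo, if_neg hne]
      rw [show ((i : Int) + 1) = ((i + 1 : Nat) : Int) by push_cast; ring, this]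
      simp only [bGo, hscan]

-- ===== VERDICT (by name: the statement is the Claim_ definition above) =====
theorem check_gap_constraint_spec : Claim_equal_check_gap_constraint := by
  intro sequence feature g _
  unfold Spec_check_gap_constraint check_gap_constraint check_gap_constraint_alt
  cases feature with
  | nil => rfl
  | cons f fs =>
    simp only [reduceCtorEq, if_false]
    exact key sequence (f :: fs) g sequence 0 0 (-1) f fs rfl rfl
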